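-- pv_equiv track=rewrite | github.com/Priwinn/MicroAutoChess | src/core/scratch.py | generate_hex_grid
-- ===== SOURCE A (Python) =====
-- def create_hex_cell(content=""):
--     """
--     Returns a list of 5 strings representing the ASCII art for a single hex cell.
--     The cell is 6 characters wide and 5 lines high.
--     The middle (third) line shows the content, centered in a field of width 4.
--     """
--     # Ensure the content fits in 4 characters.
--     content_str = str(content)[:4]
--     # Each cell's 5 lines:
--     cell = [
--         "   /\\  ",  # line 0: top point
--         " /    \\ ",  # line 1: upper sides
--         f"|{content_str:^6}|",  # line 2: content line (centered in 4 spaces)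
--         " \\    / ",  # line 3: lower sides
--         "   \\/  "   # line 4: bottom point
--     ]
--     return cell
--
-- def generate_hex_grid(rows, cols, contents=None):
--     """
--     Generates an ASCII drawing of an odd-r hex grid with point-up hexes.
--
--     Parameters:
--       rows (int): Number of hex rows.
--       cols (int): Number of hex columns.
--       contents: An optional 2D list (rows x cols) of content strings for each cell.
--                 If omitted, the cell's coordinate (r,c) is used.
--
--     Returns:
--       A string containing the complete ASCII art grid.
--     """
--     # Each hex cell's dimensions
--     cell_width = 6   # each cell drawn is 6 characters wide
--     cell_height = 5  # each cell drawn is 5 lines tall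
--
--     # In a point-up hex grid the vertical stacking overlaps.
--     # We use a vertical offset of 3 lines per row.
--     vert_offset = 3
--     canvas_height = (rows - 1) * vert_offset + cell_height
--     # For horizontal extent, odd rows get shifted by half cell width (3 spaces).
--     canvas_width = cell_width * cols + 10  # extra for shifted rows
--
--     # Create a blank canvas (list of lists of characters)
--     canvas = [[" " for _ in range(canvas_width)] for _ in range(canvas_height)]
--
--     # If no contents provided, fill with default coordinates.
--     if contents is None:
--         contents = [[f"{r},{c}" for c in range(cols)] for r in range(rows)]
--
--     # For each hex cell, compute its top-left position and overlay its ASCII art onto the canvas.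
--     for r in range(rows):
--         for c in range(cols):
--             # For odd rows (1-indexed odd, i.e. r % 2 == 1 in 0-indexing),
--             # we indent by half the cell width (3 spaces)
--             x_offset = (3 if (r % 2 == 1) else 0) + c * cell_width
--             y_offset = r * vert_offset
--             # Get content for this cell (each cell's content is trimmed/padded in create_hex_cell)
--             cell_content = contents[r][c] if r < len(contents) and c < len(contents[r]) else ""
--             cell_art = create_hex_cell(cell_content)
--
--             # Overlay the cell art onto the canvas:
--             for i in range(cell_height):
--                 # Compute the canvas row index
--                 canvas_y = y_offset + i
--                 # Skip if outside the canvas (should not happen)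
--                 if canvas_y >= canvas_height:
--                     continue
--                 line = cell_art[i]
--                 for j, char in enumerate(line):
--                     canvas_x = x_offset + j
--                     if canvas_x < canvas_width:
--                         # Only non-space characters overwrite what's there.
--                         if char != " ":
--                             canvas[canvas_y][canvas_x] = char
--
--     # Convert canvas to string lines
--     ascii_art = "\n".join("".join(row) for row in canvas)
--     return ascii_art
-- ===== SOURCE B (Python) =====
-- def generate_hex_grid(rows, cols, contents=None):
--     """Line-by-line renderer: no persistent 2D canvas; each output line is a
--     fresh buffer, painted only by the hex rows whose art intersects that line."""
--     canvas_height = (rows - 1) * 3 + 5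
--     canvas_width = 6 * cols + 10
--     if contents is None:
--         contents = [[f"{r},{c}" for c in range(cols)] for r in range(rows)]
--     lines = []
--     for y in range(canvas_height):
--         buf = [" "] * canvas_width
--         # hex row r paints line y iff r*3 <= y < r*3+5
--         for r in range(max(0, (y - 2) // 3), min(rows, y // 3 + 1)):
--             i = y - r * 3
--             for c in range(cols):
--                 x_offset = (3 if r % 2 == 1 else 0) + c * 6
--                 content = contents[r][c] if r < len(contents) and c < len(contents[r]) else ""
--                 line = _cell_line(i, content)
--                 for j, ch in enumerate(line):
--                     x = x_offset + j
--                     if x < canvas_width and ch != " ":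
--                         buf[x] = ch
--         lines.append("".join(buf))
--     return "\n".join(lines)
--
-- def _cell_line(i, content=""):
--     content_str = str(content)[:4]
--     return [
--         "   /\\  ",
--         " /    \\ ",
--         f"|{content_str:^6}|",
--         " \\    / ",
--         "   \\/  ",
--     ][i]
-- ===== Notes on version B (the rewrite author's own statement) =====
-- stated objective: alternative
-- what changed: B builds the picture one output line at a time (a fresh one-line buffer per canvas row, painted only by the hex rows whose 5-line art intersects it) instead of pre-allocating a persistent 2D canvas and overlaying every cell's full art onto it.
import Mathlib
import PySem

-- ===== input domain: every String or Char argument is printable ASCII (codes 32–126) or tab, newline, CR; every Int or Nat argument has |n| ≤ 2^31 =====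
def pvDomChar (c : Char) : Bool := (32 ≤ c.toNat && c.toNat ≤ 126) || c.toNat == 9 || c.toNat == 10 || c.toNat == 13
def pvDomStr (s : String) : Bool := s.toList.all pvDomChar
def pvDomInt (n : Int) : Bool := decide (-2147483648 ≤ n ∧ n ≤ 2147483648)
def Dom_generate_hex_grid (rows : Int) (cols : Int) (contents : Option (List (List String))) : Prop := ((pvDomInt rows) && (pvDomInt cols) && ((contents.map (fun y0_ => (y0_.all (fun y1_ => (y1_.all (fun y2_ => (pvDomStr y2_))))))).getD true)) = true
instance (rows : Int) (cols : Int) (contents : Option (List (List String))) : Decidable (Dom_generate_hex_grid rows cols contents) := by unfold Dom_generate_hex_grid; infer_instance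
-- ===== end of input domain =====

-- B renders the grid line-by-line into fresh one-line buffers instead of overlaying cells onto a
-- persistent 2D canvas; same output (return value) on every input, A is total.

-- ===== SHARED HELPERS (identical code in Source A and Source B: create_hex_cell, the default
-- contents comprehension, and the guarded contents[r][c] lookup) =====

-- create_hex_cell: str(content)[:4], centred by f"{s:^6}" (extra pad on the right)
def cellArt (content : String) : List (List Char) :=
  let s := content.toList.take 4
  let pad := 6 - s.length
  let l := pad / 2
  [ "   /\\  ".toList,
    " /    \\ ".toList,
    '|' :: (List.replicate l ' ' ++ s ++ List.replicate (pad - l) ' ') ++ ['|'],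
    " \\    / ".toList,
    "   \\/  ".toList ]

-- [[f"{r},{c}" for c in range(cols)] for r in range(rows)]
def defaultContents (rows cols : Int) : List (List String) :=
  (PySem.List.pyRange 0 rows 1).map (fun r =>
    (PySem.List.pyRange 0 cols 1).map (fun c =>
      String.mk (PySem.Int.toChars r ++ [','] ++ PySem.Int.toChars c)))

-- contents[r][c] if r < len(contents) and c < len(contents[r]) else ""  (exact for r,c ≥ 0, the loop indices)
def cellContent (cs : List (List String)) (r c : Int) : String :=
  (PySem.List.pyGet? ((PySem.List.pyGet? cs r).getD []) c).getD ""

-- ===== PORT A =====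
-- the nested (r, c, i, j) overlay loop onto the pre-allocated canvas; canvas[y][x] = ch is
-- List.modify y (·.set x ch) — y = r*3+i and x = x_offset+j are ≥ 0, so .toNat is exact
def hexCanvas (rows cols : Int) (cs : List (List String)) : List (List Char) :=
  let canvasHeight : Int := (rows - 1) * 3 + 5
  let canvasWidth : Int := 6 * cols + 10
  let canvas0 : List (List Char) :=
    (List.range canvasHeight.toNat).map (fun _ => List.replicate canvasWidth.toNat ' ')
  (PySem.List.pyRange 0 rows 1).foldl (fun cv r =>
    (PySem.List.pyRange 0 cols 1).foldl (fun cv c =>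
      let xoff : Int := (if PySem.Int.mod r 2 = 1 then 3 else 0) + c * 6
      let art := cellArt (cellContent cs r c)
      (PySem.List.pyRange 0 5 1).foldl (fun cv i =>
        if canvasHeight ≤ r * 3 + i then cv
        else
          (PySem.List.enumerate (art.getD i.toNat [])).foldl (fun cv jc =>
            if xoff + jc.1 < canvasWidth then
              if jc.2 ≠ ' ' then
                cv.modify (r * 3 + i).toNat (fun row => row.set (xoff + jc.1).toNat jc.2)
              else cv
            else cv) cv) cv) cv) canvas0

def generate_hex_grid (rows : Int) (cols : Int) (contents : Option (List (List String))) : String :=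
  let cs := contents.getD (defaultContents rows cols)
  String.mk (List.intercalate ['\n'] (hexCanvas rows cols cs))

-- ===== PORT B =====
-- write one cell-line's non-space characters into a one-line buffer
def overlayLine (xoff width : Int) (line : List Char) (buf : List Char) : List Char :=
  (PySem.List.enumerate line).foldl (fun buf jc =>
    if xoff + jc.1 < width ∧ jc.2 ≠ ' ' then buf.set (xoff + jc.1).toNat jc.2 else buf) buf

-- for each output line y, paint the cells whose art intersects y into a fresh blank buffer
def hexLines (rows cols : Int) (cs : List (List String)) : List (List Char) :=
  let canvasHeight : Int := (rows - 1) * 3 + 5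
  let canvasWidth : Int := 6 * cols + 10
  (PySem.List.pyRange 0 canvasHeight 1).map (fun y =>
    -- hex row r paints line y iff r*3 <= y < r*3+5, i.e. (y-2)//3 <= r <= y//3
    (PySem.List.pyRange (max 0 (PySem.Int.floordiv (y - 2) 3))
        (min rows (PySem.Int.floordiv y 3 + 1)) 1).foldl (fun buf r =>
      (PySem.List.pyRange 0 cols 1).foldl (fun buf c =>
        let xoff : Int := (if PySem.Int.mod r 2 = 1 then 3 else 0) + c * 6
        overlayLine xoff canvasWidth
          ((cellArt (cellContent cs r c)).getD (y - r * 3).toNat []) buf) buf)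
      (List.replicate canvasWidth.toNat ' '))

def generate_hex_grid_alt (rows : Int) (cols : Int) (contents : Option (List (List String))) : String :=
  let cs := contents.getD (defaultContents rows cols)
  String.mk (List.intercalate ['\n'] (hexLines rows cols cs))

-- ===== PRECONDITION & SPEC =====
def Spec_generate_hex_grid (rows : Int) (cols : Int) (contents : Option (List (List String))) (out : String) : Prop := out = generate_hex_grid_alt rows cols contents
instance (rows : Int) (cols : Int) (contents : Option (List (List String))) (out : String) : Decidable (Spec_generate_hex_grid rows cols contents out) := by unfold Spec_generate_hex_grid; infer_instance

-- ===== CLAIM (what is proved, stated in full; the proofs are below) =====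
def Claim_equal_generate_hex_grid : Prop := ∀ (rows : Int) (cols : Int) (contents : Option (List (List String))), Dom_generate_hex_grid rows cols contents → Spec_generate_hex_grid rows cols contents (generate_hex_grid rows cols contents)

-- ===== LEMMAS AND PROOFS =====

-- fold of guarded writes at one fixed canvas row = one modify of that row
theorem pv_foldl_modify_fuse {α β : Type} (n : Nat) (P : α → Prop) [DecidablePred P]
    (g : α → β → β) (l : List α) :
    ∀ cv : List β,
      l.foldl (fun cv a => if P a then cv.modify n (g a) else cv) cv
        = cv.modify n (fun row => l.foldl (fun row a => if P a then g a row else row) row) := by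
  induction l with
  | nil => intro cv; exact (List.modify_id n cv).symm
  | cons a l ih =>
    intro cv
    by_cases h : P a
    · simp only [List.foldl_cons, if_pos h, ih, List.modify_modify_eq]; rfl
    · simp only [List.foldl_cons, if_neg h, ih]

-- canvas-level fold vs row-level fold, through getElem?
theorem pv_foldl_get_map {α β : Type} (n : Nat) (l : List α)
    (F : List β → α → List β) (G : β → α → β)
    (hFG : ∀ cv a, a ∈ l → (F cv a)[n]? = (cv[n]?).map (fun x => G x a)) :
    ∀ cv, (l.foldl F cv)[n]? = (cv[n]?).map (fun x => l.foldl G x) := by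
  induction l with
  | nil => intro cv; simp
  | cons a l ih =>
    intro cv
    simp only [List.foldl_cons]
    rw [ih (fun cv a ha => hFG cv a (List.mem_cons_of_mem _ ha)),
        hFG cv a (List.mem_cons_self ..), Option.map_map]
    rfl

-- one i-step of A's overlay, seen at output row n (< canvasHeight)
theorem pv_step_get {β : Type} (h cy : Int) (hcy : 0 ≤ cy) (f : β → β)
    (cv : List β) (n : Nat) (hn : (n : Int) < h) :
    (if h ≤ cy then cv else cv.modify cy.toNat f)[n]?
      = if cy = (n : Int) then (cv[n]?).map f else cv[n]? := by
  by_cases hg : h ≤ cy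
  · rw [if_pos hg, if_neg (by omega)]
  · rw [if_neg hg, List.getElem?_modify]
    by_cases he : cy = (n : Int)
    · rw [if_pos he]
      have : cy.toNat = n := by omega
      simp [this, Option.map]
    · rw [if_neg he]
      have : cy.toNat ≠ n := by omega
      cases cv[n]? <;> simp [this]

-- the five i-steps of one cell, seen at output row n
theorem pv_steps_get {β : Type} (h r : Int) (g : Int → β → β)
    (n : Nat) (hn : (n : Int) < h) (hr : 0 ≤ r) :
    ∀ (is : List Int), (∀ i ∈ is, 0 ≤ i) →
      ∀ cv : List β,
        (is.foldl (fun cv i => if h ≤ r * 3 + i then cv else cv.modify (r * 3 + i).toNat (g i)) cv)[n]?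
          = (cv[n]?).map (fun row => is.foldl (fun row i => if r * 3 + i = (n : Int) then g i row else row) row) := by
  intro is
  induction is with
  | nil => intro _ cv; simp
  | cons i is ih =>
    intro hpos cv
    simp only [List.foldl_cons]
    rw [ih (fun j hj => hpos j (List.mem_cons_of_mem _ hj)),
        pv_step_get h (r * 3 + i) (by have := hpos i (List.mem_cons_self ..); omega) _ cv n hn]
    by_cases he : r * 3 + i = (n : Int)
    · simp only [if_pos he, Option.map_map]
      rfl
    · simp only [if_neg he]

-- a c-independent guard pulls out of the c-fold
theorem pv_foldl_ite_out {α β : Type} (P : Prop) [Decidable P] (g : α → β → β)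
    (l : List α) (b : β) :
    l.foldl (fun row a => if P then g a row else row) b
      = if P then l.foldl (fun row a => g a row) b else b := by
  by_cases hp : P
  · simp only [if_pos hp]
  · simp only [if_neg hp, List.foldl_fixed]

-- every canvas update preserves the number of rows
theorem pv_foldl_length {α β : Type} (l : List α) (F : List β → α → List β)
    (hF : ∀ cv a, (F cv a).length = cv.length) :
    ∀ cv, (l.foldl F cv).length = cv.length := by
  induction l with
  | nil => intro cv; simp
  | cons a l ih => intro cv; rw [List.foldl_cons, ih, hF]

theorem pv_hexCanvas_length (rows cols : Int) (cs : List (List String)) :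
    (hexCanvas rows cols cs).length = ((rows - 1) * 3 + 5).toNat := by
  unfold hexCanvas
  rw [pv_foldl_length]
  · simp
  · intro cv r
    rw [pv_foldl_length]
    intro cv c
    rw [pv_foldl_length]
    intro cv i
    by_cases hg : (rows - 1) * 3 + 5 ≤ r * 3 + i
    · rw [if_pos hg]
    · rw [if_neg hg, pv_foldl_length]
      intro cv jc
      split_ifs <;> simp [List.length_modify]

-- A's cell (r,c) acts on output row n exactly as B's guarded per-line overlay
theorem pv_cell_get (h w : Int) (r xoff : Int) (art : List (List Char))
    (hr : 0 ≤ r) (n : Nat) (hn : (n : Int) < h) (cv : List (List Char)) :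
    ((PySem.List.pyRange 0 5 1).foldl (fun cv i =>
        if h ≤ r * 3 + i then cv
        else
          (PySem.List.enumerate (art.getD i.toNat [])).foldl (fun cv jc =>
            if xoff + jc.1 < w then
              if jc.2 ≠ ' ' then
                cv.modify (r * 3 + i).toNat (fun row => row.set (xoff + jc.1).toNat jc.2)
              else cv
            else cv) cv) cv)[n]?
      = (cv[n]?).map (fun row =>
          if r * 3 ≤ (n : Int) ∧ (n : Int) < r * 3 + 5 then
            overlayLine xoff w (art.getD ((n : Int) - r * 3).toNat []) row
          else row) := by
  have hfuse : ∀ (i : Int) (cv : List (List Char)),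
      (PySem.List.enumerate (art.getD i.toNat [])).foldl (fun cv jc =>
          if xoff + jc.1 < w then
            if jc.2 ≠ ' ' then
              cv.modify (r * 3 + i).toNat (fun row => row.set (xoff + jc.1).toNat jc.2)
            else cv
          else cv) cv
        = cv.modify (r * 3 + i).toNat (overlayLine xoff w (art.getD i.toNat [])) := by
    intro i cv
    have hfn : (fun (cv : List (List Char)) (jc : Int × Char) =>
          if xoff + jc.1 < w then
            if jc.2 ≠ ' ' then
              cv.modify (r * 3 + i).toNat (fun row => row.set (xoff + jc.1).toNat jc.2)
            else cv
          else cv)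
        = (fun cv jc =>
            if xoff + jc.1 < w ∧ jc.2 ≠ ' ' then
              cv.modify (r * 3 + i).toNat (fun row => row.set (xoff + jc.1).toNat jc.2)
            else cv) := by
      funext cv jc
      by_cases h1 : xoff + jc.1 < w <;> by_cases h2 : jc.2 ≠ ' ' <;> simp [h1, h2]
    rw [hfn]
    exact pv_foldl_modify_fuse (β := List Char) (r * 3 + i).toNat
      (fun jc : Int × Char => xoff + jc.1 < w ∧ jc.2 ≠ ' ')
      (fun jc row => row.set (xoff + jc.1).toNat jc.2)
      (PySem.List.enumerate (art.getD i.toNat [])) cv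
  simp only [hfuse]
  rw [show PySem.List.pyRange 0 5 1 = [0, 1, 2, 3, 4] from rfl]
  rw [pv_steps_get h r (fun i => overlayLine xoff w (art.getD i.toNat [])) n hn hr
      [0, 1, 2, 3, 4] (by intro i hi; fin_cases hi <;> norm_num) cv]
  congr 1
  funext row
  simp only [List.foldl_cons, List.foldl_nil]
  by_cases hg : r * 3 ≤ (n : Int) ∧ (n : Int) < r * 3 + 5
  · rw [if_pos hg]
    split_ifs with h0 h1 h2 h3 h4 <;> try omega
    all_goals first
      | (have hi : Int.toNat 0 = ((n : Int) - r * 3).toNat := by omega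
         rw [hi])
      | (have hi : Int.toNat 1 = ((n : Int) - r * 3).toNat := by omega
         rw [hi])
      | (have hi : Int.toNat 2 = ((n : Int) - r * 3).toNat := by omega
         rw [hi])
      | (have hi : Int.toNat 3 = ((n : Int) - r * 3).toNat := by omega
         rw [hi])
      | (have hi : Int.toNat 4 = ((n : Int) - r * 3).toNat := by omega
         rw [hi])
  · rw [if_neg hg]
    split_ifs <;> first | rfl | omega

-- a fold with an if-guard is the fold over the filtered list
theorem pv_foldl_guard_filter {β : Type} (P : Int → Prop) [DecidablePred P]
    (f : β → Int → β) :
    ∀ (l : List Int) (b : β),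
      l.foldl (fun b a => if P a then f b a else b) b
        = (l.filter (fun a => decide (P a))).foldl f b := by
  intro l
  induction l with
  | nil => intro b; rfl
  | cons a l ih =>
    intro b
    by_cases h : P a <;> simp [h, ih]

-- filtering a range by an interval condition is the clamped sub-range
theorem pv_pyRange_filter_window (r0 r1 : Int) (P : Int → Prop) [DecidablePred P]
    (hP : ∀ r, P r ↔ (r0 ≤ r ∧ r < r1)) :
    ∀ (k : Nat) (a b : Int), (b - a).toNat = k →
      (PySem.List.pyRange a b 1).filter (fun r => decide (P r))
        = PySem.List.pyRange (max a r0) (min b r1) 1 := by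
  intro k
  induction k with
  | zero =>
    intro a b hk
    rw [PySem.List.pyRange_one_eq_nil (by omega), PySem.List.pyRange_one_eq_nil (by omega)]
    rfl
  | succ k ih =>
    intro a b hk
    rw [PySem.List.pyRange_one_cons (by omega), List.filter_cons]
    by_cases hpa : P a
    · have hw := (hP a).1 hpa
      rw [if_pos (by simpa using hpa), ih (a + 1) b (by omega),
          PySem.List.pyRange_one_cons (show max a r0 < min b r1 by omega)]
      have h1 : max a r0 = a := by omega
      have h2 : max (a + 1) r0 = a + 1 := by omega
      rw [h1, h2]
    · have hw := fun h => hpa ((hP a).2 h)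
      have hw' : a < r0 ∨ r1 ≤ a := by by_contra hc; exact hw (by omega)
      rw [if_neg (by simpa using hpa), ih (a + 1) b (by omega)]
      rcases hw' with hw' | hw'
      · have : max (a + 1) r0 = max a r0 := by omega
        rw [this]
      · rw [PySem.List.pyRange_one_eq_nil (by omega), PySem.List.pyRange_one_eq_nil (by omega)]

-- the heart: A's finished canvas equals B's line list
theorem pv_canvas_eq_lines (rows cols : Int) (cs : List (List String)) :
    hexCanvas rows cols cs = hexLines rows cols cs := by
  apply List.ext_getElem?
  intro n
  by_cases hn : (n : Int) < (rows - 1) * 3 + 5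
  · -- row n exists on both sides
    have hP : ∀ r : Int, (r * 3 ≤ (n : Int) ∧ (n : Int) < r * 3 + 5)
        ↔ (PySem.Int.floordiv ((n : Int) - 2) 3 ≤ r ∧ r < PySem.Int.floordiv (n : Int) 3 + 1) := by
      intro r
      have e1 := PySem.Int.floordiv_mul_add_mod ((n : Int)) 3
      have e2 := PySem.Int.floordiv_mul_add_mod ((n : Int) - 2) 3
      have m1 := PySem.Int.mod_nonneg (a := (n : Int)) (show (0 : Int) < 3 by omega)
      have m2 := PySem.Int.mod_lt (a := (n : Int)) (show (0 : Int) < 3 by omega)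
      have m3 := PySem.Int.mod_nonneg (a := (n : Int) - 2) (show (0 : Int) < 3 by omega)
      have m4 := PySem.Int.mod_lt (a := (n : Int) - 2) (show (0 : Int) < 3 by omega)
      omega
    have hB : (hexLines rows cols cs)[n]? = some
        ((PySem.List.pyRange (max 0 (PySem.Int.floordiv ((n : Int) - 2) 3))
            (min rows (PySem.Int.floordiv (n : Int) 3 + 1)) 1).foldl (fun buf r =>
          (PySem.List.pyRange 0 cols 1).foldl (fun buf c =>
            overlayLine ((if PySem.Int.mod r 2 = 1 then 3 else 0) + c * 6) (6 * cols + 10)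
              ((cellArt (cellContent cs r c)).getD ((n : Int) - r * 3).toNat []) buf) buf)
          (List.replicate (6 * cols + 10).toNat ' ')) := by
      unfold hexLines
      rw [List.getElem?_map, PySem.List.getElem?_pyRange_one,
          if_pos (by omega : n < ((rows - 1) * 3 + 5 - 0).toNat)]
      simp
    rw [hB]
    unfold hexCanvas
    rw [pv_foldl_get_map (β := List Char) n (PySem.List.pyRange 0 rows 1) _
        (fun row r =>
          if r * 3 ≤ (n : Int) ∧ (n : Int) < r * 3 + 5 then
            (PySem.List.pyRange 0 cols 1).foldl (fun buf c =>
              overlayLine ((if PySem.Int.mod r 2 = 1 then 3 else 0) + c * 6) (6 * cols + 10)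
                ((cellArt (cellContent cs r c)).getD ((n : Int) - r * 3).toNat []) buf) row
          else row)]
    · rw [List.getElem?_map, List.getElem?_range (by omega : n < ((rows - 1) * 3 + 5).toNat)]
      simp only [Option.map_some]
      congr 1
      rw [pv_foldl_guard_filter (fun r => r * 3 ≤ (n : Int) ∧ (n : Int) < r * 3 + 5),
          pv_pyRange_filter_window (PySem.Int.floordiv ((n : Int) - 2) 3)
            (PySem.Int.floordiv (n : Int) 3 + 1) _ hP (rows - 0).toNat 0 rows rfl]
    · intro cv r hrmem
      have hr : 0 ≤ r := (PySem.List.mem_pyRange_one.1 hrmem).1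
      rw [pv_foldl_get_map (β := List Char) n (PySem.List.pyRange 0 cols 1) _
          (fun row c =>
            if r * 3 ≤ (n : Int) ∧ (n : Int) < r * 3 + 5 then
              overlayLine ((if PySem.Int.mod r 2 = 1 then 3 else 0) + c * 6) (6 * cols + 10)
                ((cellArt (cellContent cs r c)).getD ((n : Int) - r * 3).toNat []) row
            else row)]
      · congr 1
        funext row
        rw [pv_foldl_ite_out]
      · intro cv c _
        exact pv_cell_get ((rows - 1) * 3 + 5) (6 * cols + 10) r _ _ hr n hn cv
  · -- row n does not exist on either side
    have h1 : (hexCanvas rows cols cs)[n]? = none := by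
      rw [List.getElem?_eq_none_iff, pv_hexCanvas_length]; omega
    have h2 : (hexLines rows cols cs)[n]? = none := by
      rw [List.getElem?_eq_none_iff]
      unfold hexLines
      simp only [List.length_map, PySem.List.length_pyRange_one]
      omega
    rw [h1, h2]

-- ===== VERDICT (by name: the statement is the Claim_ definition above) =====
theorem generate_hex_grid_spec : Claim_equal_generate_hex_grid := by
  intro rows cols contents _
  unfold Spec_generate_hex_grid generate_hex_grid generate_hex_grid_alt
  simp only [pv_canvas_eq_lines]
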